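-- pv_equiv track=rewrite | github.com/kuznetsov-dm/ai_meeting_manager_free | src/aimn/ui/controllers/artifact_kind_bar_controller.py | resolve_active_kind
-- ===== SOURCE A (Python) =====
-- from collections.abc import Mapping, Sequence
--
-- def resolve_active_kind(kinds: Sequence[str], active_kind: str) -> str:
--     available = [str(kind or "").strip() for kind in (kinds or []) if str(kind or "").strip()]
--     selected = str(active_kind or "").strip()
--     if selected and selected in available:
--         return selected
--     if available:
--         return available[0]
--     return ""
-- ===== SOURCE B (Python) =====
-- def resolve_active_kind(kinds, active_kind):
--     selected = str(active_kind or "").strip()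
--     candidates = [(i, str(kind or "").strip()) for i, kind in enumerate(kinds or [])]
--     candidates = [(i, k) for i, k in candidates if k]
--     if not candidates:
--         return ""
--     return min(candidates, key=lambda p: (p[1] != selected, p[0]))[1]
-- ===== Notes on version B (the rewrite author's own statement) =====
-- stated objective: alternative
-- what changed: B computes the answer as a single min over the enumerated cleaned (index, kind) pairs with priority key (kind-differs-from-selected, index), replacing A's intermediate 'available' list with its membership test and positional indexing by one prioritized selection.
import Mathlib
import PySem

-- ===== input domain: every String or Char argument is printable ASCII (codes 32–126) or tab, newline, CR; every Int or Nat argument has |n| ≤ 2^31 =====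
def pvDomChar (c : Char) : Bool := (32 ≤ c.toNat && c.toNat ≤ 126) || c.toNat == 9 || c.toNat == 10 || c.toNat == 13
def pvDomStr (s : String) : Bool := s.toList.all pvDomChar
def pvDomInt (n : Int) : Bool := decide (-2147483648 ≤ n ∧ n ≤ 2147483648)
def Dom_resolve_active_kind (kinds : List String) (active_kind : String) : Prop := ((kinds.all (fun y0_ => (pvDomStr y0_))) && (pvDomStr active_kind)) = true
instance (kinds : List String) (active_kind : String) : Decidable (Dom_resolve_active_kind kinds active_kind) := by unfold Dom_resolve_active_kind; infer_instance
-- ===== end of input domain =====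

-- B replaces A's 'available' list + membership test + indexing by one prioritized min-selection
-- over the enumerated cleaned pairs (objective: alternative algorithm, same cost).

-- ===== PORT A =====
-- Note: for a str argument, Python's `str(kind or "")` is just `kind` ("" stays itself), so the
-- normalization is exactly `.strip()`; `kinds or []` iterates the same elements as `kinds`.
def resolve_active_kind (kinds : List String) (active_kind : String) : String :=
  -- available = [str(kind or "").strip() for kind in (kinds or []) if str(kind or "").strip()]
  let available := kinds.filterMap (fun kind =>
    let s := PySem.Str.strip kind
    if s = "" then none else some s)
  -- selected = str(active_kind or "").strip()
  let selected := PySem.Str.strip active_kind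
  if selected ≠ "" ∧ selected ∈ available then selected
  else if available ≠ [] then available.headD ""   -- available[0] under the nonempty guard
  else ""

-- ===== PORT B =====
def resolve_active_kind_alt (kinds : List String) (active_kind : String) : String :=
  let selected := PySem.Str.strip active_kind
  -- candidates = [(i, str(kind or "").strip()) for i, kind in enumerate(kinds or [])]
  let cleaned := (PySem.List.enumerate kinds 0).map (fun p => (p.1, PySem.Str.strip p.2))
  -- candidates = [(i, k) for i, k in candidates if k]
  let candidates := cleaned.filter (fun p => p.2 != "")
  -- if not candidates: return ""  /  min(candidates, key=lambda p: (p[1] != selected, p[0]))[1]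
  match PySem.List.min2? candidates (fun p => p.2 != selected) (fun p => p.1) with
  | none => ""
  | some m => m.2

-- ===== PRECONDITION & SPEC =====
def Spec_resolve_active_kind (kinds : List String) (active_kind : String) (out : String) : Prop := out = resolve_active_kind_alt kinds active_kind
instance (kinds : List String) (active_kind : String) (out : String) : Decidable (Spec_resolve_active_kind kinds active_kind out) := by unfold Spec_resolve_active_kind; infer_instance

-- ===== CLAIM (what is proved, stated in full; the proofs are below) =====
def Claim_equal_resolve_active_kind : Prop := ∀ (kinds : List String) (active_kind : String), Dom_resolve_active_kind kinds active_kind → Spec_resolve_active_kind kinds active_kind (resolve_active_kind kinds active_kind)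

-- ===== LEMMAS AND PROOFS =====

-- A's 'available' list
def pvAvail (kinds : List String) : List String :=
  kinds.filterMap (fun kind =>
    let s := PySem.Str.strip kind
    if s = "" then none else some s)

-- B's 'candidates' list, with the enumerate start generalized for induction
def pvCand (kinds : List String) (s : Int) : List (Int × String) :=
  ((PySem.List.enumerate kinds s).map (fun p => (p.1, PySem.Str.strip p.2))).filter
    (fun p => p.2 != "")

lemma pvCand_map_snd (kinds : List String) (s : Int) :
    (pvCand kinds s).map (·.2) = pvAvail kinds := by
  induction kinds generalizing s with
  | nil => simp [pvCand, pvAvail]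
  | cons k rest ih =>
    by_cases h : PySem.Str.strip k = ""
    · simp [pvCand, pvAvail, PySem.List.enumerate_cons, h]
      simp [pvCand] at ih; simpa [pvAvail] using ih (s + 1)
    · simp [pvCand, pvAvail, PySem.List.enumerate_cons, h]
      simp [pvCand] at ih; simpa [pvAvail] using ih (s + 1)

lemma pvCand_lb (kinds : List String) (s : Int) :
    ∀ c ∈ pvCand kinds s, s ≤ c.1 := by
  induction kinds generalizing s with
  | nil => simp [pvCand]
  | cons k rest ih =>
    intro c hc
    by_cases h : PySem.Str.strip k = ""
    · simp [pvCand, PySem.List.enumerate_cons, h] at hc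
      have := ih (s + 1) c (by simpa [pvCand] using hc)
      omega
    · simp only [pvCand, PySem.List.enumerate_cons, List.map_cons, List.filter_cons] at hc
      simp only [bne_iff_ne, ne_eq, h, not_false_iff, if_true] at hc
      rcases List.mem_cons.mp hc with h1 | h2
      · subst h1; omega
      · have := ih (s + 1) c (by simpa [pvCand] using h2)
        omega

lemma pvCand_pairwise (kinds : List String) (s : Int) :
    (pvCand kinds s).Pairwise (fun a b => a.1 < b.1) := by
  induction kinds generalizing s with
  | nil => simp [pvCand]
  | cons k rest ih =>
    by_cases h : PySem.Str.strip k = ""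
    · simpa [pvCand, PySem.List.enumerate_cons, h] using
        (by simpa [pvCand] using ih (s + 1) :
          ((((PySem.List.enumerate rest (s+1)).map
              (fun p => (p.1, PySem.Str.strip p.2))).filter (fun p => p.2 != "")).Pairwise
            (fun a b => a.1 < b.1)))
    · simp only [pvCand, PySem.List.enumerate_cons, List.map_cons, List.filter_cons,
        bne_iff_ne, ne_eq, h, not_false_iff, if_true]
      constructor
      · intro c hc
        have := pvCand_lb rest (s + 1) c (by simpa [pvCand] using hc)
        omega
      · simpa [pvCand] using ih (s + 1)

lemma pvCand_snd_ne (kinds : List String) (s : Int) :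
    ∀ c ∈ pvCand kinds s, c.2 ≠ "" := by
  intro c hc
  have := List.of_mem_filter hc
  simpa using this

-- characterization of min2? on an index-increasing nonempty list: the first match of
-- 'selected' wins, else the head
lemma pvMin2_char (selected : String) :
    ∀ (cs : List (Int × String)) (m : Int × String),
      (∀ c ∈ cs, m.1 < c.1) → cs.Pairwise (fun a b => a.1 < b.1) →
      PySem.List.min2? (m :: cs) (fun p : Int × String => p.2 != selected)
          (fun p : Int × String => p.1)
        = some (if m.2 = selected then m
                else (cs.find? (fun c => c.2 == selected)).getD m) := by
  intro cs
  induction cs with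
  | nil =>
    intro m _ _
    by_cases h : m.2 = selected <;> simp [PySem.List.min2?, h]
  | cons x rest ih =>
    intro m hlb hpw
    have hxm : m.1 < x.1 := hlb x (List.mem_cons_self)
    have ihx : ∀ (m' : Int × String), (∀ c ∈ rest, m'.1 < c.1) →
        PySem.List.min2? (m' :: rest) (fun p : Int × String => p.2 != selected)
            (fun p : Int × String => p.1)
          = some (if m'.2 = selected then m'
                  else (rest.find? (fun c => c.2 == selected)).getD m') :=
      fun m' h => ih m' h hpw.of_cons
    by_cases hm : m.2 = selected
    · -- accumulator already matches: x cannot improve (no k1-improvement, larger index)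
      have h1 : (m.2 != selected) = false := by simp [hm]
      have h2 : ¬ (x.1 < m.1) := by omega
      have := ihx m (fun c hc => hlb c (List.mem_cons_of_mem _ hc))
      simp only [PySem.List.min2?, List.foldl_cons] at this ⊢
      split_ifs with hcnd
      · exact absurd hcnd (by simp [h1, h2])
      · rw [this]
        simp [hm]
    · have h1 : (m.2 != selected) = true := by simp [hm]
      by_cases hx : x.2 = selected
      · -- x matches selected: strict k1-improvement, accumulator becomes x
        have h2 : (x.2 != selected) = false := by simp [hx]
        have := ihx x (fun c hc => List.rel_of_pairwise_cons hpw hc)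
        simp only [PySem.List.min2?, List.foldl_cons] at this ⊢
        split_ifs with hcnd
        · rw [this]
          simp [hx]
        · exact absurd (by simp [h1, h2]) hcnd
      · -- neither matches: tie on k1, x's index is larger, keep m
        have h2 : (x.2 != selected) = true := by simp [hx]
        have h3 : ¬ (x.1 < m.1) := by omega
        have := ihx m (fun c hc => hlb c (List.mem_cons_of_mem _ hc))
        simp only [PySem.List.min2?, List.foldl_cons] at this ⊢
        have hfx : (x.2 == selected) = false := by simp [hx]
        split_ifs with hcnd
        · exact absurd hcnd (by simp [h1, h2, h3])
        · rw [this]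
          simp [hm, hfx]

-- ===== VERDICT (by name: the statement is the Claim_ definition above) =====
theorem resolve_active_kind_spec : Claim_equal_resolve_active_kind := by
  intro kinds active_kind _
  unfold Spec_resolve_active_kind resolve_active_kind resolve_active_kind_alt
  dsimp only []
  set selected := PySem.Str.strip active_kind with hsel
  have hA : (kinds.filterMap (fun kind =>
      let s := PySem.Str.strip kind
      if s = "" then none else some s)) = pvAvail kinds := rfl
  have hC : (((PySem.List.enumerate kinds 0).map
      (fun p => (p.1, PySem.Str.strip p.2))).filter (fun p => p.2 != ""))
      = pvCand kinds 0 := rfl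
  rw [hA, hC]
  cases hcs : pvCand kinds 0 with
  | nil =>
    have hav : pvAvail kinds = [] := by
      have := pvCand_map_snd kinds 0; rw [hcs] at this; simpa using this.symm
    simp [PySem.List.min2?, hav]
  | cons c0 rest =>
    have hav : pvAvail kinds = c0.2 :: rest.map (·.2) := by
      have := pvCand_map_snd kinds 0; rw [hcs] at this; simpa using this.symm
    have hpw : (c0 :: rest).Pairwise (fun a b => a.1 < b.1) := by
      rw [← hcs]; exact pvCand_pairwise kinds 0
    have hmin := pvMin2_char selected rest c0
      (fun c hc => List.rel_of_pairwise_cons hpw hc) hpw.of_cons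
    rw [hmin]
    have hc0ne : c0.2 ≠ "" := by
      have := pvCand_snd_ne kinds 0 c0 (by rw [hcs]; exact List.mem_cons_self)
      exact this
    by_cases hcond : selected ≠ "" ∧ selected ∈ pvAvail kinds
    · rw [if_pos hcond]
      by_cases h0 : c0.2 = selected
      · simp [h0]
      · -- selected occurs among the rest
        have hmem : selected ∈ rest.map (·.2) := by
          have hin : selected ∈ c0.2 :: rest.map (·.2) := by rw [← hav]; exact hcond.2
          rcases List.mem_cons.mp hin with h | h
          · exact absurd h.symm h0
          · exact h
        obtain ⟨c, hc, hc2⟩ := List.mem_map.mp hmem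
        have hsome : (rest.find? (fun c => c.2 == selected)).isSome := by
          rw [List.find?_isSome]
          exact ⟨c, hc, by simp [hc2]⟩
        obtain ⟨c', hc'⟩ := Option.isSome_iff_exists.mp hsome
        have hc'2 : c'.2 = selected := by
          have := List.find?_some hc'
          simpa using this
        simp [h0, hc', hc'2]
    · rw [if_neg hcond]
      -- A returns available[0] = c0.2 (available is nonempty); show B also returns c0.2
      have h0 : c0.2 ≠ selected := by
        intro h
        exact hcond ⟨by rw [← h]; exact hc0ne, by rw [hav, ← h]; exact List.mem_cons_self⟩
      have hnone : rest.find? (fun c => c.2 == selected) = none := by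
        rw [List.find?_eq_none]
        intro c hc hb
        have hc2 : c.2 = selected := by simpa using hb
        have hcne : c.2 ≠ "" := by
          refine pvCand_snd_ne kinds 0 c ?_
          rw [hcs]; exact List.mem_cons_of_mem _ hc
        exact hcond ⟨by rw [← hc2]; exact hcne,
          by rw [hav]; exact List.mem_cons_of_mem _ (List.mem_map.mpr ⟨c, hc, hc2⟩)⟩
      simp [h0, hnone, hav]
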